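-- pv_equiv track=rewrite | github.com/LiuTielong/Iron_ant_simulator | bitfusion/graph_plot/stackedbarchart.py | _extract_bench_metadata
-- ===== SOURCE A (Python) =====
-- def _extract_bench_metadata(header_row):
-- 	bench_names = []
-- 	column_bench = []
-- 	current = None
-- 	for cell in header_row[1:]:
-- 		name = cell.strip()
-- 		if name:
-- 			current = name
-- 			if not bench_names or bench_names[-1] != name:
-- 				bench_names.append(name)
-- 		column_bench.append(current)
-- 	return bench_names, column_bench
-- ===== SOURCE B (Python) =====
-- def _extract_bench_metadata(header_row):
--     names = [cell.strip() for cell in header_row[1:]]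
--     column_bench = []
--     for name in names:
--         column_bench.append(name or (column_bench[-1] if column_bench else None))
--     bench_names = [name for prev, name in zip([None] + column_bench, names)
--                    if name and name != prev]
--     return bench_names, column_bench
-- ===== Notes on version B (the rewrite author's own statement) =====
-- stated objective: simpler
-- what changed: B strips all cells once, builds column_bench by a self-referential forward-fill (reading column_bench[-1] instead of carrying a 'current' variable), and then derives bench_names afterwards as a comprehension over zip(shifted column_bench, names), instead of A's single loop that interleaves maintaining 'current' and conditionally appending to bench_names via bench_names[-1].
-- outside the precondition, e.g. on _extract_bench_metadata(['h', '', 'a']): A returns (['a'], [None, 'a']), B returns (['a'], [None, 'a'])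
import Mathlib
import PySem

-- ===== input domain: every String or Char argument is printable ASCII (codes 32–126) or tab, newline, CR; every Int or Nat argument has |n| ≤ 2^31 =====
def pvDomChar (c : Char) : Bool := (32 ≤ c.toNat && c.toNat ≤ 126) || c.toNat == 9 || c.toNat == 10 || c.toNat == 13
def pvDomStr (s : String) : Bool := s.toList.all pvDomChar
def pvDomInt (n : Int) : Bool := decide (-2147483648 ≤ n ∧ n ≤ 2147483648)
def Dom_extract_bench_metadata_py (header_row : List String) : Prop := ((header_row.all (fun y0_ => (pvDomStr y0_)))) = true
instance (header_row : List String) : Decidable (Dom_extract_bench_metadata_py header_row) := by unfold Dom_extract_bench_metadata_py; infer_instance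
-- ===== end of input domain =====

-- B computes the same (bench_names, column_bench) by a forward-fill pass plus a zip comprehension
-- instead of A's single interleaved loop; equal return values on Pre_ (no mutation involved).

-- ===== PORT A =====
-- port of A's loop: state (bench_names, column_bench, current); None rendered as "" at the end
-- (Pre_ excludes the inputs on which Python's column_bench contains None)
def extract_bench_metadata_py (header_row : List String) : List String × List String :=
  let st := (PySem.List.slice header_row (some 1) none).foldl
    (fun (st : List String × List (Option String) × Option String) cell =>
      let name := PySem.Str.strip cell
      let bn_cur : List String × Option String :=
        if name ≠ "" then
          (if st.1 = [] ∨ st.1.getLast? ≠ some name then st.1 ++ [name] else st.1, some name)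
        else (st.1, st.2.2)
      (bn_cur.1, st.2.1 ++ [bn_cur.2], bn_cur.2))
    ([], [], none)
  (st.1, st.2.1.map (fun o => o.getD ""))

-- ===== PORT B =====
-- port of Source B: strip once, forward-fill column_bench via its own last element, then the
-- zip/filter comprehension for bench_names; None rendered as "" at the end, as in port A
def extract_bench_metadata_py_alt (header_row : List String) : List String × List String :=
  let names := (PySem.List.slice header_row (some 1) none).map PySem.Str.strip
  let column_bench := names.foldl
    (fun (cb : List (Option String)) name =>
      cb ++ [if name ≠ "" then some name else cb.getLast?.getD none]) []
  let bench_names := ((none :: column_bench).zip names).filterMap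
    (fun pn => if pn.2 ≠ "" ∧ pn.1 ≠ some pn.2 then some pn.2 else none)
  (bench_names, column_bench.map (fun o => o.getD ""))

-- ===== PRECONDITION & SPEC =====
-- Pre_ excludes headers whose first data cell (header_row[1]) strips to empty: there Python's
-- column_bench starts with None, which is not a value of the declared list-of-str return type
-- (both A and B return that same None-containing value; the ports render None as "").
def Pre_extract_bench_metadata_py (header_row : List String) : Prop :=
  ∀ s ∈ (header_row.drop 1).take 1, PySem.Str.strip s ≠ ""
instance (header_row : List String) : Decidable (Pre_extract_bench_metadata_py header_row) := by
  unfold Pre_extract_bench_metadata_py; infer_instance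
def pvWitness_extract_bench_metadata_py : List String := ["bench", "A", " A ", "", "B"]

def Spec_extract_bench_metadata_py (header_row : List String) (out : List String × List String) : Prop := out = extract_bench_metadata_py_alt header_row
instance (header_row : List String) (out : List String × List String) : Decidable (Spec_extract_bench_metadata_py header_row out) := by unfold Spec_extract_bench_metadata_py; infer_instance

-- ===== CLAIM (what is proved, stated in full; the proofs are below) =====
def Claim_equal_extract_bench_metadata_py : Prop := ∀ (header_row : List String), Dom_extract_bench_metadata_py header_row → Pre_extract_bench_metadata_py header_row → Spec_extract_bench_metadata_py header_row (extract_bench_metadata_py header_row)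

-- ===== LEMMAS AND PROOFS =====
-- reference forward-fill: from a current name, produce (bench additions, column options)
def pvFF : Option String → List String → List String × List (Option String)
  | _, [] => ([], [])
  | cur, n :: ns =>
    if n = "" then
      let p := pvFF cur ns; (p.1, cur :: p.2)
    else
      let p := pvFF (some n) ns
      ((if cur = some n then p.1 else n :: p.1), some n :: p.2)

-- A's loop step, on an already-stripped name
def pvStepA (st : List String × List (Option String) × Option String) (name : String) :
    List String × List (Option String) × Option String :=
  let bn_cur : List String × Option String :=
    if name ≠ "" then
      (if st.1 = [] ∨ st.1.getLast? ≠ some name then st.1 ++ [name] else st.1, some name)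
    else (st.1, st.2.2)
  (bn_cur.1, st.2.1 ++ [bn_cur.2], bn_cur.2)

-- B's column_bench step
def pvStepB (cb : List (Option String)) (name : String) : List (Option String) :=
  cb ++ [if name ≠ "" then some name else cb.getLast?.getD none]

lemma pvStepA_eq (st : List String × List (Option String) × Option String) (name : String) :
    pvStepA st name =
      if name = "" then (st.1, st.2.1 ++ [st.2.2], st.2.2)
      else (if st.1 = [] ∨ st.1.getLast? ≠ some name then st.1 ++ [name] else st.1,
            st.2.1 ++ [some name], some name) := by
  by_cases h : name = "" <;> simp [pvStepA, h]

lemma pvFoldA_eq (ns : List String) : ∀ (bn : List String) (cb : List (Option String)) (cur : Option String),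
    (cur = none → bn = []) → (∀ c, cur = some c → bn.getLast? = some c) →
    (ns.foldl pvStepA (bn, cb, cur)).1 = bn ++ (pvFF cur ns).1 ∧
    (ns.foldl pvStepA (bn, cb, cur)).2.1 = cb ++ (pvFF cur ns).2 := by
  induction ns with
  | nil => intro bn cb cur _ _; simp [pvFF]
  | cons n ns ih =>
    intro bn cb cur hnone hsome
    by_cases hn : n = ""
    · subst hn
      have hstep : pvStepA (bn, cb, cur) "" = (bn, cb ++ [cur], cur) := by
        rw [pvStepA_eq]; simp
      have := ih bn (cb ++ [cur]) cur hnone hsome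
      simpa [pvFF, List.foldl_cons, hstep, List.append_assoc] using this
    · by_cases hc : cur = some n
      · subst hc
        have hlast : bn.getLast? = some n := hsome n rfl
        have hne : bn ≠ [] := by intro h; simp [h] at hlast
        have hstep : pvStepA (bn, cb, some n) n = (bn, cb ++ [some n], some n) := by
          rw [pvStepA_eq, if_neg hn, if_neg (by simp [hne, hlast])]
        have := ih bn (cb ++ [some n]) (some n) (by simp) (fun c hcc => by
          simp only [Option.some.injEq] at hcc; simpa [hcc] using hlast)
        simpa [pvFF, hn, List.foldl_cons, hstep, List.append_assoc] using this
      · have hcond : bn = [] ∨ bn.getLast? ≠ some n := by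
          cases hcur : cur with
          | none => exact Or.inl (hnone hcur)
          | some c =>
            refine Or.inr ?_
            have hl := hsome c hcur
            rw [hl]
            intro h
            simp only [Option.some.injEq] at h
            exact hc (by rw [hcur, h])
        have hstep : pvStepA (bn, cb, cur) n = (bn ++ [n], cb ++ [some n], some n) := by
          rw [pvStepA_eq, if_neg hn, if_pos hcond]
        have := ih (bn ++ [n]) (cb ++ [some n]) (some n) (by simp)
          (fun c hcc => by simp only [Option.some.injEq] at hcc; simp [hcc])
        simpa [pvFF, hn, hc, List.foldl_cons, hstep, List.append_assoc] using this

lemma pvFoldB_eq (ns : List String) : ∀ (acc : List (Option String)) (cur : Option String),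
    acc.getLast?.getD none = cur →
    ns.foldl pvStepB acc = acc ++ (pvFF cur ns).2 := by
  induction ns with
  | nil => intro acc cur _; simp [pvFF]
  | cons n ns ih =>
    intro acc cur hcur
    by_cases hn : n = ""
    · subst hn
      have hstep : pvStepB acc "" = acc ++ [cur] := by simp [pvStepB, hcur]
      have := ih (acc ++ [cur]) cur (by simp)
      simpa [pvFF, List.foldl_cons, hstep, List.append_assoc] using this
    · have hstep : pvStepB acc n = acc ++ [some n] := by simp [pvStepB, hn]
      have := ih (acc ++ [some n]) (some n) (by simp)
      simpa [pvFF, hn, List.foldl_cons, hstep, List.append_assoc] using this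

lemma pvZip_eq (ns : List String) : ∀ (cur : Option String),
    ((cur :: (pvFF cur ns).2).zip ns).filterMap
      (fun pn => if pn.2 ≠ "" ∧ pn.1 ≠ some pn.2 then some pn.2 else none)
    = (pvFF cur ns).1 := by
  induction ns with
  | nil => intro cur; simp [pvFF]
  | cons n ns ih =>
    intro cur
    by_cases hn : n = ""
    · subst hn
      simpa [pvFF, List.zip_cons_cons, List.filterMap_cons] using ih cur
    · by_cases hc : cur = some n
      · subst hc
        simpa [pvFF, hn, List.zip_cons_cons, List.filterMap_cons] using ih (some n)
      · simpa [pvFF, hn, hc, List.zip_cons_cons, List.filterMap_cons] using ih (some n)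

-- ===== VERDICT (by name: the statement is the Claim_ definition above) =====
theorem extract_bench_metadata_py_spec : Claim_equal_extract_bench_metadata_py := by
  intro header_row _ _
  unfold Spec_extract_bench_metadata_py extract_bench_metadata_py extract_bench_metadata_py_alt
  have hmapA :
      (PySem.List.slice header_row (some 1) none).foldl
        (fun (st : List String × List (Option String) × Option String) cell =>
          let name := PySem.Str.strip cell
          let bn_cur : List String × Option String :=
            if name ≠ "" then
              (if st.1 = [] ∨ st.1.getLast? ≠ some name then st.1 ++ [name] else st.1, some name)
            else (st.1, st.2.2)
          (bn_cur.1, st.2.1 ++ [bn_cur.2], bn_cur.2))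
        ([], [], none)
      = ((PySem.List.slice header_row (some 1) none).map PySem.Str.strip).foldl pvStepA ([], [], none) := by
    rw [List.foldl_map]
    rfl
  have hBfun : (fun (cb : List (Option String)) (name : String) =>
      cb ++ [if name ≠ "" then some name else cb.getLast?.getD none]) = pvStepB := rfl
  set names := (PySem.List.slice header_row (some 1) none).map PySem.Str.strip with hnames
  have hA := pvFoldA_eq names [] [] none (fun _ => rfl) (fun c h => by simp at h)
  have hB := pvFoldB_eq names [] none rfl
  simp only [hmapA, hBfun]
  have h1 : (names.foldl pvStepA ([], [], none)).1 = (pvFF none names).1 := by simpa using hA.1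
  have h2 : (names.foldl pvStepA ([], [], none)).2.1 = (pvFF none names).2 := by simpa using hA.2
  have h3 : names.foldl pvStepB [] = (pvFF none names).2 := by simpa using hB
  rw [h1, h2, h3, pvZip_eq names none]
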